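-- pv_equiv track=rewrite | github.com/riisatoro/dots | django-dots/api/game/calc_square.py | process
-- ===== SOURCE A (Python) =====
-- def process(field, colors):
--     captured = [0]*len(colors)
--     captured_colors = list(map(lambda color: color[0]+"l", colors))
--     colors = list(map(lambda color: color[0], colors))
--
--     for row in field:
--         for point in row:
--             if point != "E" and point in captured_colors:
--                 captured[colors.index(point[0])] = captured[colors.index(point[0])] + 1
--
--     captured_dict = dict(zip(colors, captured[::-1]))
--     return captured_dict
-- ===== SOURCE B (Python) =====
-- def process(field, colors):
--     cnt = {}
--     for row in field:
--         for point in row: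
--             cnt[point] = cnt.get(point, 0) + 1
--     firsts = [color[0] for color in colors]
--     captured = [0] * len(colors)
--     seen = set()
--     for i, ch in enumerate(firsts):
--         if ch not in seen:
--             seen.add(ch)
--             captured[i] = cnt.get(ch + "l", 0)
--     return dict(zip(firsts, captured[::-1]))
-- ===== Notes on version B (the rewrite author's own statement) =====
-- stated objective: faster
-- what changed: B replaces A's per-point linear scans (membership test in captured_colors and two list.index calls per point) by one counting pass over the field into a dict plus one seen-set pass over the colors, mirroring A's first-occurrence index collapse and reversed zip.
import Mathlib
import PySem

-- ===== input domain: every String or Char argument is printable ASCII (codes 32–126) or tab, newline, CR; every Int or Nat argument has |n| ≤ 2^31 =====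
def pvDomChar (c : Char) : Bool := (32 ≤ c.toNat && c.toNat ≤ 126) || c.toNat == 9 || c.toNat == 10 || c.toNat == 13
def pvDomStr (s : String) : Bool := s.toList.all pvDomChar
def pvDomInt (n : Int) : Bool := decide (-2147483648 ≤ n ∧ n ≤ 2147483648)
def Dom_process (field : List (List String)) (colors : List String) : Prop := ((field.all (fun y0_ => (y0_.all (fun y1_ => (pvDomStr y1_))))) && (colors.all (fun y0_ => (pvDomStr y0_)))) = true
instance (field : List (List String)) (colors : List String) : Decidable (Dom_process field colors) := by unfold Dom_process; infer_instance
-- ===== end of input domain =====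

-- B replaces A's per-point scans of the colour lists by one counting pass over the field
-- (a dict of point counts) plus one seen-set pass over the colours; same return value.

-- ===== PORT A =====
-- color[0] as a one-character string (exact when c is nonempty; Pre_ requires all colors nonempty)
def pvFirst (c : String) : String := String.ofList (c.toList.take 1)
-- s + "l" (string concatenation, via the List Char representation)
def pvAddL (s : String) : String := String.ofList (s.toList ++ ['l'])

-- the body of A's inner loop over points
def pvStepA (capturedColors colorsF : List String) (cap : List Int) (point : String) : List Int :=
  if point ≠ "E" ∧ point ∈ capturedColors then
    match PySem.List.index? colorsF (pvFirst point) with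
    | some i => cap.set i (cap.getD i 0 + 1)   -- captured[colors.index(point[0])] = captured[...] + 1
    | none => cap                              -- Python's ValueError; unreachable under Pre_
  else cap

def process (field : List (List String)) (colors : List String) : List (String × Int) :=
  let captured0 : List Int := List.replicate colors.length 0
  let capturedColors : List String := colors.map (fun c => pvAddL (pvFirst c))
  let colorsF : List String := colors.map pvFirst
  let captured : List Int :=
    field.foldl (fun cap row => row.foldl (pvStepA capturedColors colorsF) cap) captured0
  (PySem.Dict.ofList (colorsF.zip captured.reverse)).items

-- ===== PORT B =====
-- cnt[point] = cnt.get(point, 0) + 1 over all rows and points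
def pvCountPoints (field : List (List String)) : PySem.Dict String Int :=
  field.foldl (fun d row => row.foldl (fun d p => d.modify p 0 (· + 1)) d) PySem.Dict.empty

-- the body of B's loop 'for i, ch in enumerate(firsts)' carrying (captured, seen)
def pvStepB (cnt : PySem.Dict String Int) (st : List Int × PySem.Set String)
    (ich : Int × String) : List Int × PySem.Set String :=
  if PySem.Set.contains st.2 ich.2 then st
  else (PySem.List.pySetD st.1 ich.1 (cnt.getD (pvAddL ich.2) 0), PySem.Set.add st.2 ich.2)

def process_alt (field : List (List String)) (colors : List String) : List (String × Int) :=
  let cnt := pvCountPoints field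
  let firsts : List String := colors.map pvFirst
  let captured : List Int :=
    ((PySem.List.enumerate firsts 0).foldl (pvStepB cnt)
      (List.replicate colors.length 0, PySem.Set.empty)).1
  (PySem.Dict.ofList (firsts.zip captured.reverse)).items

-- ===== PRECONDITION & SPEC =====
-- Pre_ excludes exactly the inputs where A raises: colors.index/color[0] need every color nonempty
def Pre_process (field : List (List String)) (colors : List String) : Prop := ∀ c ∈ colors, c ≠ ""
instance (field : List (List String)) (colors : List String) : Decidable (Pre_process field colors) := by
  unfold Pre_process; infer_instance

def pvWitness_process : List (List String) × List String := ([["Rl", "E"], ["Bl", "Rl"]], ["Red", "Blue"])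

def Spec_process (field : List (List String)) (colors : List String) (out : List (String × Int)) : Prop := out = process_alt field colors
instance (field : List (List String)) (colors : List String) (out : List (String × Int)) : Decidable (Spec_process field colors out) := by unfold Spec_process; infer_instance

-- ===== CLAIM (what is proved, stated in full; the proofs are below) =====
def Claim_equal_process : Prop := ∀ (field : List (List String)) (colors : List String), Dom_process field colors → Pre_process field colors → Spec_process field colors (process field colors)

-- ===== LEMMAS AND PROOFS =====

-- getD of set, at the written index and away from it
theorem pv_getD_set_self (xs : List Int) (i : Nat) (v : Int) (h : i < xs.length) :
    (xs.set i v).getD i 0 = v := by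
  simp [List.getD, h]

theorem pv_getD_set_ne (xs : List Int) (i j : Nat) (v : Int) (h : j ≠ i) :
    (xs.set i v).getD j 0 = xs.getD j 0 := by
  simp [List.getD, List.getElem?_set_ne (Ne.symm h)]

theorem pv_getD_replicate (m j : Nat) : (List.replicate m (0 : Int)).getD j 0 = 0 := by
  simp [List.getD, List.getElem?_replicate]
  split <;> rfl

-- a nonempty string's first character, as pvFirst produces it
theorem pv_first_len (c : String) (h : c ≠ "") : (pvFirst c).toList.length = 1 := by
  have h' : c.toList ≠ [] := by simpa [String.toList_eq_nil_iff] using h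
  cases hc : c.toList with
  | nil => exact absurd hc h'
  | cons a l => simp [pvFirst, hc]

theorem pv_first_addL (x : String) (hx : x.toList.length = 1) : pvFirst (pvAddL x) = x := by
  cases hc : x.toList with
  | nil => simp [hc] at hx
  | cons a l =>
    have hl : l = [] := by simpa [hc] using hx
    subst hl
    calc pvFirst (pvAddL x) = String.ofList [a] := by simp [pvFirst, pvAddL, hc]
      _ = String.ofList x.toList := by rw [hc]
      _ = x := by simp

theorem pv_addL_ne_E (x : String) (hx : x.toList.length = 1) : pvAddL x ≠ "E" := by
  intro h
  have : (pvAddL x).toList.length = 1 := by rw [h]; decide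
  simp [pvAddL, hx] at this

-- index? finds j when xs[j] = v and v does not occur earlier
theorem pv_index?_of_first (l : List String) (j : Nat) (h : j < l.length) (v : String)
    (hv : l[j] = v) (hn : v ∉ l.take j) : PySem.List.index? l v = some j := by
  rw [PySem.List.index?_eq_some_iff]
  exact ⟨l.take j, l.drop (j+1),
    by rw [← hv]; simp [List.take_append_drop, List.getElem_cons_drop],
    by simp [List.length_take, Nat.le_of_lt h], hn⟩

-- A's point loop preserves the length of captured
theorem pv_stepA_len (CC F : List String) (cap : List Int) (p : String) :
    (pvStepA CC F cap p).length = cap.length := by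
  unfold pvStepA
  split
  · split <;> simp
  · rfl

theorem pv_foldA_len (CC F : List String) (ps : List String) (cap : List Int) :
    (ps.foldl (pvStepA CC F) cap).length = cap.length := by
  induction ps generalizing cap with
  | nil => rfl
  | cons p rest ih => rw [List.foldl_cons, ih, pv_stepA_len]

-- characterisation of A's point loop: each slot accumulates a countP
theorem pv_foldA_get (CC F : List String) (ps : List String) (cap : List Int)
    (hlen : F.length ≤ cap.length) (j : Nat) :
    (ps.foldl (pvStepA CC F) cap).getD j 0 =
      cap.getD j 0 + (ps.countP (fun p =>
        decide (p ≠ "E" ∧ p ∈ CC) && (PySem.List.index? F (pvFirst p) == some j)) : Int) := by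
  induction ps generalizing cap with
  | nil => simp
  | cons p rest ih =>
    rw [List.foldl_cons, List.countP_cons,
      ih (pvStepA CC F cap p) (by rw [pv_stepA_len]; exact hlen)]
    have hstep : (pvStepA CC F cap p).getD j 0 =
        cap.getD j 0 + (if (decide (p ≠ "E" ∧ p ∈ CC) &&
          (PySem.List.index? F (pvFirst p) == some j)) = true then (1 : Int) else 0) := by
      unfold pvStepA
      by_cases hc : p ≠ "E" ∧ p ∈ CC
      · simp only [if_pos hc]
        cases hidx : PySem.List.index? F (pvFirst p) with
        | none => simp [hc, hidx]
        | some i =>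
          obtain ⟨hi, _, _⟩ := PySem.List.getElem_of_index?_eq_some hidx
          by_cases hij : i = j
          · subst hij
            rw [pv_getD_set_self _ _ _ (lt_of_lt_of_le hi hlen)]
            simp [hc]
          · rw [pv_getD_set_ne _ _ _ _ (Ne.symm hij)]
            simp [hc, hij]
      · simp [hc]
    rw [hstep]
    push_cast
    split <;> ring

-- B's enumerate loop preserves the length of captured
theorem pv_foldB_len (cnt : PySem.Dict String Int) (chs : List String) (k0 : Int)
    (cap : List Int) (seen : PySem.Set String) :
    ((PySem.List.enumerate chs k0).foldl (pvStepB cnt) (cap, seen)).1.length = cap.length := by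
  induction chs generalizing k0 cap seen with
  | nil => rfl
  | cons ch rest ih =>
    rw [PySem.List.enumerate_cons, List.foldl_cons]
    by_cases h : PySem.Set.contains seen ch
    · rw [show pvStepB cnt (cap, seen) (k0, ch) = (cap, seen) from by
          have hm := (PySem.Set.contains_iff seen ch).1 h
          simp [pvStepB, hm]]
      exact ih _ _ _
    · rw [show pvStepB cnt (cap, seen) (k0, ch) =
          (PySem.List.pySetD cap k0 (cnt.getD (pvAddL ch) 0), PySem.Set.add seen ch) from by
            have hm : ch ∉ seen := fun hm => h ((PySem.Set.contains_iff seen ch).2 hm)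
            simp [pvStepB, hm]]
      rw [ih]
      exact PySem.List.length_pySetD _ _ _

-- characterisation of B's enumerate loop: slot j is written iff j is the first position
-- (relative to k0) of its character and that character was not seen before
theorem pv_foldB_get (cnt : PySem.Dict String Int) (chs : List String) (k0 : Nat)
    (cap : List Int) (seen : PySem.Set String) (hlen : k0 + chs.length ≤ cap.length) (j : Nat) :
    ((PySem.List.enumerate chs (k0 : Int)).foldl (pvStepB cnt) (cap, seen)).1.getD j 0 =
      if k0 ≤ j ∧ j - k0 < chs.length ∧ (chs.getD (j - k0) "") ∉ seen ∧
          (chs.getD (j - k0) "") ∉ chs.take (j - k0)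
      then cnt.getD (pvAddL (chs.getD (j - k0) "")) 0 else cap.getD j 0 := by
  induction chs generalizing k0 cap seen with
  | nil => simp
  | cons ch rest ih =>
    rw [PySem.List.enumerate_cons, List.foldl_cons]
    have hcast : (k0 : Int) + 1 = ((k0 + 1 : Nat) : Int) := by push_cast; ring
    by_cases hs : ch ∈ seen
    · rw [show pvStepB cnt (cap, seen) ((k0 : Int), ch) = (cap, seen) from by
          simp [pvStepB, hs],
        hcast, ih (k0 + 1) cap seen (by simp at hlen ⊢; omega)]
      by_cases hk : k0 + 1 ≤ j
      · have hd : j - k0 = (j - (k0 + 1)) + 1 := by omega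
        rw [hd]
        simp only [List.getD_cons_succ, List.take_succ_cons, List.mem_cons, not_or,
          List.length_cons]
        refine if_congr ?_ rfl rfl
        constructor
        · rintro ⟨h1, h2, h3, h4⟩
          exact ⟨by omega, by omega, h3, fun he => h3 (he ▸ hs), h4⟩
        · rintro ⟨h1, h2, h3, h4, h5⟩
          exact ⟨by omega, by omega, h3, h5⟩
      · rw [if_neg (fun h => hk h.1), if_neg ?_]
        rintro ⟨h1, h2, h3, h4⟩
        have hj : j = k0 := by omega
        subst hj
        rw [Nat.sub_self] at h3
        exact h3 (by simpa using hs)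
    · rw [show pvStepB cnt (cap, seen) ((k0 : Int), ch) =
          (cap.set k0 (cnt.getD (pvAddL ch) 0), PySem.Set.add seen ch) from by
            simp [pvStepB, hs, PySem.List.pySetD_natCast],
        hcast, ih (k0 + 1) (cap.set k0 (cnt.getD (pvAddL ch) 0)) (PySem.Set.add seen ch)
          (by simp at hlen ⊢; omega)]
      by_cases hk : k0 + 1 ≤ j
      · have hd : j - k0 = (j - (k0 + 1)) + 1 := by omega
        rw [hd]
        simp only [List.getD_cons_succ, List.take_succ_cons, List.mem_cons, not_or,
          List.length_cons]
        refine if_congr ?_ rfl (pv_getD_set_ne _ _ _ _ (by omega))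
        constructor
        · rintro ⟨h1, h2, h3, h4⟩
          rw [PySem.Set.mem_add, not_or] at h3
          exact ⟨by omega, by omega, h3.1, h3.2, h4⟩
        · rintro ⟨h1, h2, h3, h4, h5⟩
          refine ⟨by omega, by omega, ?_, h5⟩
          rw [PySem.Set.mem_add, not_or]
          exact ⟨h3, h4⟩
      · by_cases hj : j = k0
        · subst hj
          rw [if_neg (fun h => hk h.1), if_pos ?_]
          · rw [pv_getD_set_self _ _ _ (by simp at hlen; omega), Nat.sub_self]
            simp
          · rw [Nat.sub_self]
            exact ⟨le_refl _, by simp, by simpa using hs, by simp⟩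
        · rw [if_neg (fun h => hk h.1), if_neg (fun h => hj (by omega))]
          exact pv_getD_set_ne _ _ _ _ (fun h => hj h)

-- B's dict of point counts is the Counter of the flattened field
theorem pv_countPoints_getD (field : List (List String)) (v : String) :
    (pvCountPoints field).getD v 0 = (field.flatten.count v : Int) := by
  unfold pvCountPoints
  rw [← List.foldl_flatten, ← PySem.Dict.counter_eq_foldl, PySem.Dict.getD_counter]

-- the per-slot count A accumulates equals B's counter lookup (or 0 off the first occurrence)
theorem pv_count_eq (colors : List String) (hpre : ∀ c ∈ colors, c ≠ "")
    (j : Nat) (hj : j < colors.length) (flat : List String) :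
    ((flat.countP (fun p => decide (p ≠ "E" ∧ p ∈ colors.map (fun c => pvAddL (pvFirst c))) &&
        (PySem.List.index? (colors.map pvFirst) (pvFirst p) == some j))) : Int) =
      if (colors.map pvFirst).getD j "" ∉ (colors.map pvFirst).take j
      then (flat.count (pvAddL ((colors.map pvFirst).getD j "")) : Int) else 0 := by
  have hjF : j < (colors.map pvFirst).length := by simpa using hj
  have hx : (colors.map pvFirst).getD j "" = pvFirst colors[j] := by
    rw [List.getD_eq_getElem _ _ hjF]; simp
  have hx1 : ((colors.map pvFirst).getD j "").toList.length = 1 := by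
    rw [hx]; exact pv_first_len _ (hpre _ (List.getElem_mem hj))
  set x := (colors.map pvFirst).getD j "" with hxdef
  by_cases hcond : x ∈ (colors.map pvFirst).take j
  · rw [if_neg (fun h => h hcond)]
    norm_cast
    rw [List.countP_eq_zero]
    intro p _ hp
    simp only [Bool.and_eq_true, decide_eq_true_eq, beq_iff_eq] at hp
    obtain ⟨⟨hne, hmem⟩, hpi⟩ := hp
    obtain ⟨c, hc, hpc⟩ := List.mem_map.1 hmem
    have hc1 := pv_first_len c (hpre c hc)
    have hfp : pvFirst p = pvFirst c := by rw [← hpc]; exact pv_first_addL _ hc1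
    rw [hfp] at hpi
    obtain ⟨hjlt, hFj, hfirst⟩ := PySem.List.getElem_of_index?_eq_some hpi
    have hxFj : x = pvFirst c := by rw [hx, ← hFj]; simp
    obtain ⟨i, hi, hix⟩ := List.getElem_of_mem hcond
    have hij : i < j := by
      have hlt : (List.take j (colors.map pvFirst)).length = min j (colors.map pvFirst).length :=
        List.length_take
      omega
    exact hfirst i hij (by rw [← hxFj, ← hix]; exact (List.getElem_take).symm)
  · rw [if_pos hcond]
    have hidx : PySem.List.index? (colors.map pvFirst) x = some j :=
      pv_index?_of_first _ j hjF x (by rw [hx]; simp) hcond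
    rw [List.count_eq_countP]
    congr 1
    apply List.countP_congr
    intro p _
    simp only [Bool.and_eq_true, decide_eq_true_eq, beq_iff_eq]
    constructor
    · rintro ⟨⟨hne, hmem⟩, hpi⟩
      obtain ⟨c, hc, hpc⟩ := List.mem_map.1 hmem
      have hc1 := pv_first_len c (hpre c hc)
      have hfp : pvFirst p = pvFirst c := by rw [← hpc]; exact pv_first_addL _ hc1
      rw [hfp] at hpi
      obtain ⟨_, hFj, _⟩ := PySem.List.getElem_of_index?_eq_some hpi
      have hxFj : x = pvFirst c := by rw [hx, ← hFj]; simp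
      rw [← hpc, hxFj]
    · intro hp
      subst hp
      refine ⟨⟨pv_addL_ne_E _ hx1, ?_⟩, ?_⟩
      · rw [hx]
        exact List.mem_map.2 ⟨colors[j], List.getElem_mem hj, rfl⟩
      · rw [pv_first_addL _ hx1]
        exact hidx

-- the two captured lists are equal
theorem pv_captured_eq (field : List (List String)) (colors : List String)
    (hpre : ∀ c ∈ colors, c ≠ "") :
    field.foldl (fun cap row => row.foldl (pvStepA (colors.map (fun c => pvAddL (pvFirst c)))
        (colors.map pvFirst)) cap) (List.replicate colors.length 0) =
      ((PySem.List.enumerate (colors.map pvFirst) 0).foldl (pvStepB (pvCountPoints field))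
        (List.replicate colors.length 0, PySem.Set.empty)).1 := by
  rw [← List.foldl_flatten]
  apply List.ext_getElem
  · rw [pv_foldA_len, pv_foldB_len]
  · intro j h1 h2
    have hjn : j < colors.length := by rw [pv_foldA_len] at h1; simpa using h1
    rw [← List.getD_eq_getElem _ 0 h1, ← List.getD_eq_getElem _ 0 h2]
    rw [pv_foldA_get _ _ _ _ (by simp) j]
    have hB := pv_foldB_get (pvCountPoints field) (colors.map pvFirst) 0
      (List.replicate colors.length 0) PySem.Set.empty (by simp) j
    rw [Nat.cast_zero] at hB
    rw [hB, pv_getD_replicate, zero_add,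
      pv_count_eq colors hpre j hjn field.flatten, pv_countPoints_getD]
    simp only [Nat.zero_le, true_and, Nat.sub_zero, List.length_map]
    refine if_congr ?_ rfl rfl
    constructor
    · intro h
      refine ⟨hjn, ?_, h⟩
      simp [PySem.Set.empty]
    · exact fun h => h.2.2

-- ===== VERDICT (by name: the statement is the Claim_ definition above) =====
theorem process_spec : Claim_equal_process := by
  intro field colors _ hpre
  show process field colors = process_alt field colors
  simp only [process, process_alt]
  rw [pv_captured_eq field colors hpre]
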